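-- pv_equiv track=rewrite | github.com/miliar/Code_Jam_Webscraper | Solutions_python/Problem_149/28.py | min_n
-- ===== SOURCE A (Python) =====
-- def min_n(A):
--     if len(A)==1:
--         return 0
--     min_x=min(A)
--     min_p=A.index(min_x)
--     min_c=min(min_p,len(A)-min_p-1)
--     del A[min_p]
--     return min_c+min_n(A)
-- ===== SOURCE B (Python) =====
-- def min_n(A):
--     rem = list(range(len(A)))
--     order = sorted(rem, key=lambda i: (A[i], i))
--     total = 0
--     for i in order:
--         p = rem.index(i)
--         total += min(p, len(rem) - 1 - p)
--         del rem[p]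
--     return total
-- ===== Notes on version B (the rewrite author's own statement) =====
-- stated objective: alternative
-- what changed: A recursively rescans the whole list each step (min, index, delete, recurse); B sorts the indices once by (value, index) and then iteratively replays the removals on a remaining-index list, with no recursion and no min/index scan over the values.
-- outside the precondition, e.g. on min_n([]): A raises ValueError, B returns 0
import Mathlib
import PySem

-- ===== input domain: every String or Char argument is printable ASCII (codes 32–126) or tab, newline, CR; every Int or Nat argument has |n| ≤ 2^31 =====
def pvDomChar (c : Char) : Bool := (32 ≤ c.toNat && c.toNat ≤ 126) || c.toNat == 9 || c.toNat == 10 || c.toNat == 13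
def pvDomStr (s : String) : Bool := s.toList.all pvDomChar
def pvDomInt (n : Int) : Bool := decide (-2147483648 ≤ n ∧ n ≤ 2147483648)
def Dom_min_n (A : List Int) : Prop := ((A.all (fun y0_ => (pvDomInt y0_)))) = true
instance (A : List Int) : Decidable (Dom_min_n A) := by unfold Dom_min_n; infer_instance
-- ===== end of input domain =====

-- B replaces A's recursive find-min/delete with one sort of the indices by (value, index)
-- followed by an iterative simulation on the remaining-index list (objective: alternative, not measured faster).
-- A mutates its argument in place (del A[min_p]); B does not — the equivalence proved here is about the return value only.

-- ===== PORT A =====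
-- literal port of A: if len(A)==1: return 0; min_x=min(A); min_p=A.index(min_x);
-- min_c=min(min_p,len(A)-min_p-1); del A[min_p]  (del at a valid index = List.eraseIdx, exact);
-- return min_c+min_n(A).  On A = [] Python's min([]) raises ValueError — excluded by Pre_;
-- the port returns 0 there (the `none` branches are unreachable under Pre_).
def min_n (A : List Int) : Int :=
  if A.length == 1 then 0
  else
    match PySem.List.min? A (fun x => x) with
    | none => 0
    | some m =>
      match h2 : PySem.List.index? A m with
      | none => 0
      | some p =>
        let c : Int := min (p : Int) ((A.length : Int) - (p : Int) - 1)
        c + min_n (A.eraseIdx p)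
termination_by A.length
decreasing_by
  have hk := PySem.List.getElem_of_index?_eq_some h2
  obtain ⟨hk, _, _⟩ := hk
  simpa [List.length_eraseIdx, hk] using Nat.sub_lt (Nat.lt_of_le_of_lt (Nat.zero_le _) hk) Nat.one_pos

-- ===== PORT B =====
-- loop body of Source B: p = rem.index(i); total += min(p, len(rem)-1-p); del rem[p]
-- (rem.index never raises since every i of order is in rem; the `none` branch is that guard).
def minAltStep (st : List Int × Int) (i : Int) : List Int × Int :=
  match PySem.List.index? st.1 i with
  | none => st
  | some p => (st.1.eraseIdx p, st.2 + min (p : Int) ((st.1.length : Int) - (p : Int) - 1))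

-- port of Source B: rem = list(range(len(A))); order = sorted(rem, key=lambda i: (A[i], i));
-- then the fold of the loop body over order, starting from (rem, 0).
def min_n_alt (A : List Int) : Int :=
  let rem : List Int := PySem.List.pyRange 0 (A.length : Int) 1
  let order := PySem.List.sorted2 rem (fun i => PySem.List.pyGetD A i 0) (fun i => i)
  (order.foldl minAltStep (rem, 0)).2

-- ===== PRECONDITION & SPEC =====
-- Pre_ excludes only the empty list, on which A's min([]) raises ValueError.
def Pre_min_n (A : List Int) : Prop := A ≠ []
instance (A : List Int) : Decidable (Pre_min_n A) := by unfold Pre_min_n; infer_instance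
def pvWitness_min_n : List Int := [2, 1, 2]

def Spec_min_n (A : List Int) (out : Int) : Prop := out = min_n_alt A
instance (A : List Int) (out : Int) : Decidable (Spec_min_n A out) := by unfold Spec_min_n; infer_instance

-- ===== CLAIM (what is proved, stated in full; the proofs are below) =====
def Claim_equal_min_n : Prop := ∀ (A : List Int), Dom_min_n A → Pre_min_n A → Spec_min_n A (min_n A)

-- ===== LEMMAS AND PROOFS =====

def pvKey (f : Int → Int) (i : Int) : Int ×ₗ Int := toLex (f i, i)

lemma pv_sorted2_eq (xs : List Int) (f : Int → Int) :
    PySem.List.sorted2 xs f (fun i => i) = PySem.List.sorted xs (pvKey f) := by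
  have hcmp : (fun (a b : Int) => decide (f a < f b) || (!decide (f b < f a) && decide (a < b)))
      = fun a b => decide (pvKey f a < pvKey f b) := by
    funext a b
    rw [Bool.eq_iff_iff]
    by_cases h1 : f a < f b
    · simp [pvKey, h1, Prod.Lex.toLex_lt_toLex]
    · by_cases h2 : f b < f a
      · simp [pvKey, h1, h2, Prod.Lex.toLex_lt_toLex]
        omega
      · have he : f a = f b := le_antisymm (not_lt.1 h2) (not_lt.1 h1)
        simp [pvKey, Prod.Lex.toLex_lt_toLex, he]
  unfold PySem.List.sorted2 PySem.List.sorted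
  simp only [if_neg (by decide : ¬ (false = true))]
  rw [hcmp]

lemma pv_index?_intro (xs : List Int) (v : Int) (k : Nat) (hk : k < xs.length)
    (hv : xs[k] = v) (hprev : ∀ j (hj : j < k), xs[j]'(Nat.lt_trans hj hk) ≠ v) :
    PySem.List.index? xs v = some k := by
  rw [PySem.List.index?_eq_some_iff]
  refine ⟨xs.take k, xs.drop (k+1), ?_, by simp [Nat.le_of_lt hk], ?_⟩
  · conv_lhs => rw [← List.take_append_drop k xs]
    rw [List.drop_eq_getElem_cons hk, hv]
  · intro hmem
    obtain ⟨j, hj, hje⟩ := List.mem_iff_getElem.1 hmem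
    have hjk : j < k := by simp [List.length_take] at hj; omega
    have := hprev j hjk
    rw [List.getElem_take] at hje
    exact this hje

lemma pv_bridge (f : Int → Int) :
    ∀ (n : Nat) (rem : List Int) (t : Int), rem.length = n → rem.Pairwise (· < ·) →
    ((PySem.List.sorted2 rem f (fun i => i)).foldl minAltStep (rem, t)).2
      = t + min_n (rem.map f) := by
  intro n
  induction n with
  | zero =>
    intro rem t hlen _
    have h0 : rem = [] := List.eq_nil_of_length_eq_zero hlen
    subst h0
    rw [min_n]
    simp [PySem.List.sorted2, PySem.List.min?]
  | succ n ih =>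
    intro rem t hlen hpw
    have hnd : rem.Nodup := hpw.imp (fun h => ne_of_lt h)
    have hperm : (PySem.List.sorted2 rem f (fun i => i)).Perm rem :=
      PySem.List.sorted2_perm rem f _ false
    have hle : (PySem.List.sorted2 rem f (fun i => i)).Pairwise
        (fun a b => pvKey f a ≤ pvKey f b) := by
      rw [pv_sorted2_eq]
      exact PySem.List.sorted_pairwise rem (pvKey f)
    have hSnd : (PySem.List.sorted2 rem f (fun i => i)).Nodup := hperm.nodup_iff.2 hnd
    have hlt : (PySem.List.sorted2 rem f (fun i => i)).Pairwise
        (fun a b => pvKey f a < pvKey f b) := by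
      refine (hle.and hSnd).imp ?_
      rintro a b ⟨h1, h2⟩
      refine lt_of_le_of_ne h1 (fun he => h2 ?_)
      have := toLex.injective.eq_iff.1 (he : toLex (f a, a) = toLex (f b, b))
      exact congrArg Prod.snd this
    obtain ⟨i0, rest, hScons⟩ : ∃ i0 rest,
        PySem.List.sorted2 rem f (fun i => i) = i0 :: rest := by
      cases hS : PySem.List.sorted2 rem f (fun i => i) with
      | nil =>
        exfalso
        have := hperm.length_eq
        rw [hS] at this
        simp [hlen] at this
      | cons a l => exact ⟨a, l, rfl⟩
    rw [hScons] at hperm hlt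
    have hmem : i0 ∈ rem := hperm.mem_iff.1 (List.mem_cons_self ..)
    have hrest_perm : rest.Perm (rem.erase i0) :=
      (List.cons_perm_iff_perm_erase.1 hperm).2
    have hleast : ∀ j ∈ rem, j ≠ i0 → pvKey f i0 < pvKey f j := by
      intro j hj hne
      have hj' : j ∈ i0 :: rest := hperm.mem_iff.2 hj
      rcases List.mem_cons.1 hj' with h | h
      · exact absurd h hne
      · exact (List.pairwise_cons.1 hlt).1 j h
    obtain ⟨p, hp⟩ : ∃ p, PySem.List.index? rem i0 = some p := by
      have := (PySem.List.index?_isSome_iff rem i0).2 hmem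
      exact Option.isSome_iff_exists.1 this
    obtain ⟨hplt, hpe, hpprev⟩ := PySem.List.getElem_of_index?_eq_some hp
    have hp' : List.idxOf? i0 rem = some p := by
      rw [← PySem.List.index?_eq_idxOf?]; exact hp
    have herase : rem.eraseIdx p = rem.erase i0 := by
      have hidxOf : rem.idxOf i0 = p := by
        simp [List.idxOf_eq_getD_idxOf?, hp']
      exact (List.erase_eq_eraseIdx_of_idxOf hidxOf ..).symm
    have hlen' : (rem.eraseIdx p).length = n := by
      rw [List.length_eraseIdx_of_lt hplt, hlen]
      omega
    have hpw' : (rem.eraseIdx p).Pairwise (· < ·) :=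
      hpw.sublist (List.eraseIdx_sublist ..)
    have hrest : rest = PySem.List.sorted2 (rem.eraseIdx p) f (fun i => i) := by
      rw [pv_sorted2_eq]
      refine (PySem.List.sorted_eq_of_perm_of_pairwise_lt _ _ (pvKey f) ?_ ?_).symm
      · rw [herase]; exact hrest_perm
      · exact (List.pairwise_cons.1 hlt).2
    have hstep : minAltStep (rem, t) i0
        = (rem.eraseIdx p, t + min (p : Int) ((rem.length : Int) - (p : Int) - 1)) := by
      simp only [minAltStep, PySem.List.index?_eq_idxOf?, hp']
    have hR : min_n (rem.map f)
        = min (p : Int) ((rem.length : Int) - (p : Int) - 1) + min_n ((rem.eraseIdx p).map f) := by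
      by_cases hn1 : rem.length = 1
      · -- rem = [i0]: both sides are 0
        have hp0 : p = 0 := by omega
        subst hp0
        obtain ⟨x, hx⟩ : ∃ x, rem = [x] := List.length_eq_one_iff.1 hn1
        subst hx
        rw [min_n, min_n]
        norm_num
        rw [show PySem.List.min? ([] : List Int) (fun x => x) = none from
          (PySem.List.min?_eq_none_iff _ _).2 rfl]
      · -- general case: the head of the sorted order is A's first minimum
        obtain ⟨m, hm⟩ : ∃ m, PySem.List.min? (rem.map f) (fun x => x) = some m := by
          cases hmo : PySem.List.min? (rem.map f) (fun x => x) with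
          | none =>
            exfalso
            have := (PySem.List.min?_eq_none_iff (rem.map f) (fun x => x)).1 hmo
            simp at this
            subst this
            simp at hlen
          | some m => exact ⟨m, rfl⟩
        have hmv : m = f i0 := by
          refine le_antisymm (PySem.List.min?_isMin hm _ (List.mem_map_of_mem hmem)) ?_
          obtain ⟨j, hj, rfl⟩ := List.mem_map.1 (PySem.List.min?_mem hm)
          by_cases hji : j = i0
          · subst hji; exact le_refl _
          · rcases Prod.Lex.toLex_lt_toLex.1 (hleast j hj hji) with h | ⟨h, _⟩
            · exact le_of_lt h
            · exact le_of_eq h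
        have hidx : PySem.List.index? (rem.map f) m = some p := by
          subst hmv
          refine pv_index?_intro _ _ _ (by simpa using hplt) (by simp [hpe]) ?_
          intro j hj hje
          have hjlt : j < rem.length := Nat.lt_trans hj hplt
          rw [List.getElem_map] at hje
          have hne' : rem[j] ≠ i0 := hpprev j hj
          rcases Prod.Lex.toLex_lt_toLex.1
              (hleast rem[j] (List.getElem_mem hjlt) hne') with h | ⟨h, h'⟩
          · exact absurd hje.symm (ne_of_lt h)
          · have := List.pairwise_iff_getElem.1 hpw j p hjlt hplt hj
            rw [hpe] at this
            omega
        rw [min_n]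
        have hng : ((rem.map f).length == 1) = false := by
          simp [hn1]
        rw [hng]
        simp only [Bool.false_eq_true, if_false, hm]
        split
        · next h => rw [hidx] at h; cases h
        · next p2 h =>
            rw [hidx] at h
            cases h
            simp only [List.eraseIdx_map, List.length_map]
    rw [hScons, List.foldl_cons, hstep, hrest, ih _ _ hlen' hpw', hR]
    ring

theorem pv_main (A : List Int) : min_n A = min_n_alt A := by
  unfold min_n_alt
  have hlen : (PySem.List.pyRange 0 (A.length : Int) 1).length = A.length := by
    simp [PySem.List.length_pyRange_one]
  rw [pv_bridge (fun i => PySem.List.pyGetD A i 0) A.length _ 0 hlen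
      (PySem.List.pairwise_lt_pyRange_one 0 _)]
  rw [PySem.List.map_pyGetD_pyRange_zero']
  ring

-- ===== VERDICT (by name: the statement is the Claim_ definition above) =====
theorem min_n_spec : Claim_equal_min_n := by
  intro A _ _
  unfold Spec_min_n
  exact pv_main A
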